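-- pv_equiv track=rewrite | github.com/oxen-io/oxen-knights-website | updatedata.py | get_scoreboard
-- ===== SOURCE A (Python) =====
-- TWEET_POINTS = 10
--
-- LIKE_POINTS = 1
--
-- RETWEET_POINTS = 5
--
-- MAX_POINTS = 150
--
-- def get_scoreboard(usernames,favorites,retweets):
--     username_points = {}
--
--     for i in range(len(usernames)):
--
--         if usernames[i] in username_points:
--             username_points[usernames[i]] = {'tweets':username_points[usernames[i]]['tweets']+1,
--                                         'likes':username_points[usernames[i]]['likes']+ favorites[i],
--                                         'retweets':username_points[usernames[i]]['retweets']+ retweets[i],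
--                                         'points':username_points[usernames[i]]['points'] + min(MAX_POINTS,(TWEET_POINTS + favorites[i] * LIKE_POINTS + retweets[i] * RETWEET_POINTS))}
--         else:
--             username_points[usernames[i]]= {'tweets':1,
--                                     'likes':favorites[i],
--                                     'retweets':retweets[i],
--                                     'points':min(MAX_POINTS,(TWEET_POINTS + favorites[i] * LIKE_POINTS + retweets[i] * RETWEET_POINTS))}
--
--     sorted_keys = sorted(username_points,reverse=True, key=lambda x: (username_points[x]['points'], username_points[x]['tweets']))
--     scoreboard = {}
--
--     for key in sorted_keys:
--         scoreboard[key] = username_points[key]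
--
--     return scoreboard
-- ===== SOURCE B (Python) =====
-- TWEET_POINTS = 10
--
-- LIKE_POINTS = 1
--
-- RETWEET_POINTS = 5
--
-- MAX_POINTS = 150
--
-- def get_scoreboard(usernames, favorites, retweets):
--     # Pass 1: group each user's (favorites, retweets) pairs in first-appearance order.
--     groups = {}
--     for i in range(len(usernames)):
--         groups.setdefault(usernames[i], []).append((favorites[i], retweets[i]))
--     # Pass 2: reduce each group to its stats.
--     stats = {}
--     for user, tweets in groups.items():
--         stats[user] = {
--             'tweets': len(tweets),
--             'likes': sum(f for f, _ in tweets),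
--             'retweets': sum(r for _, r in tweets),
--             'points': sum(min(MAX_POINTS, TWEET_POINTS + f * LIKE_POINTS + r * RETWEET_POINTS) for f, r in tweets),
--         }
--     order = sorted(stats, reverse=True, key=lambda u: (stats[u]['points'], stats[u]['tweets']))
--     return {u: stats[u] for u in order}
-- ===== Notes on version B (the rewrite author's own statement) =====
-- stated objective: alternative
-- what changed: B replaces A's single online-accumulation loop (updating a four-field stats record per tweet) by a group-then-fold decomposition: one pass groups each user's (favorite, retweet) pairs, a second pass reduces every group to its stats with len/sum, then the same sort builds the scoreboard.
import Mathlib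
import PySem

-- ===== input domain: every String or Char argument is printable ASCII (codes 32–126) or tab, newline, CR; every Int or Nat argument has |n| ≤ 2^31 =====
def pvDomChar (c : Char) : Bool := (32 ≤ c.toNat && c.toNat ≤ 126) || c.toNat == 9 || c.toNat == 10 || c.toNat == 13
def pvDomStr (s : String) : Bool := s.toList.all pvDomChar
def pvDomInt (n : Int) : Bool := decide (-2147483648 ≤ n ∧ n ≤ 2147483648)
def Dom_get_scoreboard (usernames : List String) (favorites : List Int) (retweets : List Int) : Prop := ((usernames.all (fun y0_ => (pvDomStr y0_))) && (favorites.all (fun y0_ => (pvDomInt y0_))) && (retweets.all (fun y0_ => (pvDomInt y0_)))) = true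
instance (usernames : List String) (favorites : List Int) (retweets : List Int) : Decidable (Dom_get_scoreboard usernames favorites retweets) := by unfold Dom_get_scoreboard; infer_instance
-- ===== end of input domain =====

-- B restructures A's single online-accumulation loop into group-then-fold: pass 1 groups each
-- user's (favorite, retweet) pairs, pass 2 reduces each group with len/sum; same sort and rebuild.
-- Equivalence of the RETURN value is proved on Pre_ (favorites/retweets at least as long as usernames).

-- ===== PORT A =====
-- inner dict literal {'tweets':t,'likes':l,'retweets':r,'points':p}
def pvStats (t l r p : Int) : List (String × Int) := [("tweets", t), ("likes", l), ("retweets", r), ("points", p)]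
-- st[k] for the stored stats dicts (key always present, so the default is never the result)
def pvField (st : List (String × Int)) (k : String) : Int := ((PySem.Dict.mk st).get? k).getD 0

def get_scoreboard (usernames : List String) (favorites : List Int) (retweets : List Int) : List (String × List (String × Int)) :=
  let username_points : PySem.Dict String (List (String × Int)) :=
    (PySem.List.pyRange 0 (PySem.List.len usernames) 1).foldl (fun d i =>
      let u := PySem.List.pyGetD usernames i ""
      let f := PySem.List.pyGetD favorites i 0
      let r := PySem.List.pyGetD retweets i 0
      if d.contains u then
        let old := d.getD u []
        d.insert u (pvStats (pvField old "tweets" + 1)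
                            (pvField old "likes" + f)
                            (pvField old "retweets" + r)
                            (pvField old "points" + min 150 (10 + f * 1 + r * 5)))
      else
        d.insert u (pvStats 1 f r (min 150 (10 + f * 1 + r * 5)))) PySem.Dict.empty
  let sorted_keys := PySem.List.sorted2 username_points.keys
      (fun x => pvField (username_points.getD x []) "points")
      (fun x => pvField (username_points.getD x []) "tweets") true
  (sorted_keys.foldl (fun sb k => sb.insert k (username_points.getD k [])) PySem.Dict.empty).items

-- ===== PORT B =====
-- reduce one group: {'tweets':len,'likes':sum fav,'retweets':sum rt,'points':sum capped}
def pvReduce (ts : List (Int × Int)) : List (String × Int) :=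
  [("tweets", (ts.length : Int)),
   ("likes", (ts.map (·.1)).sum),
   ("retweets", (ts.map (·.2)).sum),
   ("points", (ts.map (fun p => min 150 (10 + p.1 * 1 + p.2 * 5))).sum)]

def get_scoreboard_alt (usernames : List String) (favorites : List Int) (retweets : List Int) : List (String × List (String × Int)) :=
  let groups : PySem.Dict String (List (Int × Int)) :=
    (PySem.List.pyRange 0 (PySem.List.len usernames) 1).foldl (fun g i =>
      g.modify (PySem.List.pyGetD usernames i "") []
        (· ++ [(PySem.List.pyGetD favorites i 0, PySem.List.pyGetD retweets i 0)])) PySem.Dict.empty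
  let stats : PySem.Dict String (List (String × Int)) :=
    groups.items.foldl (fun d p => d.insert p.1 (pvReduce p.2)) PySem.Dict.empty
  let order := PySem.List.sorted2 stats.keys
      (fun u => pvField (stats.getD u []) "points")
      (fun u => pvField (stats.getD u []) "tweets") true
  (order.foldl (fun d u => d.insert u (stats.getD u [])) PySem.Dict.empty).items

-- ===== PRECONDITION & SPEC =====
-- A indexes favorites[i] and retweets[i] for every i < len(usernames): shorter lists raise IndexError.
def Pre_get_scoreboard (usernames : List String) (favorites : List Int) (retweets : List Int) : Prop :=
  usernames.length ≤ favorites.length ∧ usernames.length ≤ retweets.length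
instance (usernames : List String) (favorites : List Int) (retweets : List Int) : Decidable (Pre_get_scoreboard usernames favorites retweets) := by unfold Pre_get_scoreboard; infer_instance
def pvWitness_get_scoreboard : List String × List Int × List Int := (["ann", "bob", "ann"], [3, 0, 200], [1, 2, 0])
def Spec_get_scoreboard (usernames : List String) (favorites : List Int) (retweets : List Int) (out : List (String × List (String × Int))) : Prop := out = get_scoreboard_alt usernames favorites retweets
instance (usernames : List String) (favorites : List Int) (retweets : List Int) (out : List (String × List (String × Int))) : Decidable (Spec_get_scoreboard usernames favorites retweets out) := by unfold Spec_get_scoreboard; infer_instance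

-- ===== CLAIM (what is proved, stated in full; the proofs are below) =====
def Claim_equal_get_scoreboard : Prop := ∀ (usernames : List String) (favorites : List Int) (retweets : List Int), Dom_get_scoreboard usernames favorites retweets → Pre_get_scoreboard usernames favorites retweets → Spec_get_scoreboard usernames favorites retweets (get_scoreboard usernames favorites retweets)

-- ===== LEMMAS AND PROOFS =====

-- one iteration of A's accumulation loop, on a (user, fav, rt) triple
def pvStepA (d : PySem.Dict String (List (String × Int))) (t : String × Int × Int) : PySem.Dict String (List (String × Int)) :=
  if d.contains t.1 then
    d.insert t.1 (pvStats (pvField (d.getD t.1 []) "tweets" + 1)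
                          (pvField (d.getD t.1 []) "likes" + t.2.1)
                          (pvField (d.getD t.1 []) "retweets" + t.2.2)
                          (pvField (d.getD t.1 []) "points" + min 150 (10 + t.2.1 * 1 + t.2.2 * 5)))
  else d.insert t.1 (pvStats 1 t.2.1 t.2.2 (min 150 (10 + t.2.1 * 1 + t.2.2 * 5)))

-- one iteration of B's grouping loop, on a (user, fav, rt) triple
def pvStepB (g : PySem.Dict String (List (Int × Int))) (t : String × Int × Int) : PySem.Dict String (List (Int × Int)) :=
  g.modify t.1 [] (· ++ [(t.2.1, t.2.2)])

-- the common tail of both ports: sort the keys, rebuild the scoreboard dict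
def pvFinish (d : PySem.Dict String (List (String × Int))) : List (String × List (String × Int)) :=
  ((PySem.List.sorted2 d.keys
      (fun x => pvField (d.getD x []) "points")
      (fun x => pvField (d.getD x []) "tweets") true).foldl
    (fun sb k => sb.insert k (d.getD k [])) PySem.Dict.empty).items

-- map a groups dict to the stats dict it reduces to
def pvMapD (g : PySem.Dict String (List (Int × Int))) : PySem.Dict String (List (String × Int)) :=
  PySem.Dict.mk (g.items.map (fun p => (p.1, pvReduce p.2)))

theorem pvMapD_items (g : PySem.Dict String (List (Int × Int))) :
    (pvMapD g).items = g.items.map (fun p => (p.1, pvReduce p.2)) := rfl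

theorem pvMapD_keys (g : PySem.Dict String (List (Int × Int))) : (pvMapD g).keys = g.keys := by
  simp [pvMapD, PySem.Dict.keys]

theorem pvField_pvReduce_tweets (ts : List (Int × Int)) : pvField (pvReduce ts) "tweets" = (ts.length : Int) := by
  simp [pvField, pvReduce, PySem.Dict.get?_mk_cons]
theorem pvField_pvReduce_likes (ts : List (Int × Int)) : pvField (pvReduce ts) "likes" = (ts.map (·.1)).sum := by
  simp [pvField, pvReduce, PySem.Dict.get?_mk_cons]
theorem pvField_pvReduce_retweets (ts : List (Int × Int)) : pvField (pvReduce ts) "retweets" = (ts.map (·.2)).sum := by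
  simp [pvField, pvReduce, PySem.Dict.get?_mk_cons]
theorem pvField_pvReduce_points (ts : List (Int × Int)) : pvField (pvReduce ts) "points" = (ts.map (fun p => min 150 (10 + p.1 * 1 + p.2 * 5))).sum := by
  simp [pvField, pvReduce, PySem.Dict.get?_mk_cons]

theorem pvReduce_append (ts : List (Int × Int)) (f r : Int) :
    pvReduce (ts ++ [(f, r)]) =
      pvStats ((ts.length : Int) + 1) ((ts.map (·.1)).sum + f) ((ts.map (·.2)).sum + r)
        ((ts.map (fun p => min 150 (10 + p.1 * 1 + p.2 * 5))).sum + min 150 (10 + f * 1 + r * 5)) := by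
  simp [pvReduce, pvStats]

-- one step of A's loop on the mapped dict = the mapped step of B's grouping loop
theorem pvStep :
    ∀ (g : PySem.Dict String (List (Int × Int))), g.keys.Nodup → ∀ (t : String × Int × Int),
    pvStepA (pvMapD g) t = pvMapD (pvStepB g t) := by
  intro g hnd t
  obtain ⟨u, f, r⟩ := t
  have hc : (pvMapD g).contains u = g.contains u := by
    rw [Bool.eq_iff_iff, PySem.Dict.contains_iff_mem_keys, PySem.Dict.contains_iff_mem_keys, pvMapD_keys]
  unfold pvStepA pvStepB PySem.Dict.modify
  dsimp only
  by_cases h : g.contains u = true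
  · -- existing key: in-place replacement on both sides
    obtain ⟨ts, hts⟩ : ∃ ts, g.get? u = some ts := by
      rcases ho : g.get? u with _ | ts
      · rw [PySem.Dict.get?_eq_none_iff_contains] at ho; simp [h] at ho
      · exact ⟨ts, rfl⟩
    have hmem : (u, ts) ∈ g.items := PySem.Dict.mem_items_of_get?_eq_some g hts
    have hndm : (pvMapD g).keys.Nodup := by rw [pvMapD_keys]; exact hnd
    have hgd : (pvMapD g).getD u [] = pvReduce ts :=
      PySem.Dict.getD_of_mem_items (pvMapD g) (List.mem_map.2 ⟨(u, ts), hmem, rfl⟩) hndm []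
    rw [if_pos (by rw [hc]; exact h)]
    apply PySem.Dict.ext
    rw [PySem.Dict.items_insert_of_contains _ _ (by rw [hc]; exact h),
        pvMapD_items,
        PySem.Dict.getD_of_get?_eq_some _ _ hts,
        pvMapD_items (g.insert u (ts ++ [(f, r)])),
        PySem.Dict.items_insert_of_contains _ _ h,
        List.map_map, List.map_map]
    apply List.map_congr_left
    intro p hp
    by_cases he : p.1 = u
    · have hp2 : p = (u, ts) := by
        have h2 : p.2 = ts := by
          have hg := PySem.Dict.get?_of_mem_items g hp hnd
          rw [he, hts] at hg; exact (Option.some.inj hg).symm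
        cases p; simp_all
      subst hp2
      simp only [Function.comp_def, hgd]
      rw [pvField_pvReduce_tweets, pvField_pvReduce_likes, pvField_pvReduce_retweets, pvField_pvReduce_points]
      simp [pvReduce_append]
    · simp only [Function.comp_def]
      rw [if_neg (by simpa using he), if_neg (by simpa using he)]
  · -- fresh key: both sides append at the end
    have h' : g.contains u = false := by simpa using h
    rw [if_neg (by rw [hc]; simp [h'])]
    apply PySem.Dict.ext
    rw [PySem.Dict.items_insert_of_not_contains _ _ (by rw [hc]; simp [h']),
        pvMapD_items,
        PySem.Dict.getD_of_not_contains _ _ h',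
        pvMapD_items (g.insert u ([] ++ [(f, r)])),
        PySem.Dict.items_insert_of_not_contains _ _ h']
    simp [pvReduce, pvStats]

theorem pvNodupStepB (g : PySem.Dict String (List (Int × Int))) (hnd : g.keys.Nodup) (t : String × Int × Int) :
    (pvStepB g t).keys.Nodup := by
  have h := PySem.Dict.nodup_keys_foldl_modify_key (l := [t])
      (key := fun t : String × Int × Int => t.1) (d0 := [])
      (f := fun _ t old => old ++ [(t.2.1, t.2.2)]) (d := g) hnd
  simpa [pvStepB] using h

-- A's whole accumulation loop over a triple list equals the reduction of B's grouping loop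
theorem pvLoop (l : List (String × Int × Int)) :
    ∀ (g : PySem.Dict String (List (Int × Int))), g.keys.Nodup →
    l.foldl pvStepA (pvMapD g) = pvMapD (l.foldl pvStepB g) := by
  induction l with
  | nil => intro g _; rfl
  | cons t l ih =>
    intro g hnd
    simp only [List.foldl_cons]
    rw [pvStep g hnd t]
    exact ih _ (pvNodupStepB g hnd t)

-- the index loop over range(len(usernames)) is the loop over the zipped triples
theorem pvIndexLoop {α : Type} (us : List String) (fs rs : List Int)
    (h1 : us.length ≤ fs.length) (h2 : us.length ≤ rs.length)
    (step : α → String × Int × Int → α) (init : α) :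
    (PySem.List.pyRange 0 (PySem.List.len us) 1).foldl
        (fun acc i => step acc (PySem.List.pyGetD us i "", PySem.List.pyGetD fs i 0, PySem.List.pyGetD rs i 0)) init
      = (us.zip (fs.zip rs)).foldl step init := by
  have hlen : (us.zip (fs.zip rs)).length = us.length := by
    simp [List.length_zip]; omega
  have hcong : (PySem.List.pyRange 0 (PySem.List.len us) 1).foldl
        (fun acc i => step acc (PySem.List.pyGetD us i "", PySem.List.pyGetD fs i 0, PySem.List.pyGetD rs i 0)) init
      = (PySem.List.pyRange 0 (PySem.List.len (us.zip (fs.zip rs))) 1).foldl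
        (fun acc i => step acc (PySem.List.pyGetD (us.zip (fs.zip rs)) i ("", 0, 0))) init := by
    rw [show PySem.List.len (us.zip (fs.zip rs)) = PySem.List.len us by simp [PySem.List.len_eq, hlen]]
    apply PySem.List.foldl_congr_mem
    intro acc i hi
    have hib : 0 ≤ i ∧ i < (us.length : Int) := by
      have hm := PySem.List.mem_pyRange_one.1 hi
      constructor
      · exact hm.1
      · simpa [PySem.List.len_eq] using hm.2
    rw [PySem.List.pyGetD_eq_getElem (us.zip (fs.zip rs)) ("", 0, 0) hib.1 (by omega),
        PySem.List.pyGetD_eq_getElem us "" hib.1 (by omega),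
        PySem.List.pyGetD_eq_getElem fs 0 hib.1 (by omega),
        PySem.List.pyGetD_eq_getElem rs 0 hib.1 (by omega)]
    congr 1
    rw [List.getElem_zip, List.getElem_zip]
  rw [hcong, PySem.List.foldl_pyRange_zero_pyGetD]

theorem get_scoreboard_eq (us : List String) (fs rs : List Int)
    (h1 : us.length ≤ fs.length) (h2 : us.length ≤ rs.length) :
    get_scoreboard us fs rs = get_scoreboard_alt us fs rs := by
  -- both sides, written with the named step functions and the shared tail (definitionally equal)
  show pvFinish ((PySem.List.pyRange 0 (PySem.List.len us) 1).foldl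
        (fun acc i => pvStepA acc (PySem.List.pyGetD us i "", PySem.List.pyGetD fs i 0, PySem.List.pyGetD rs i 0))
        PySem.Dict.empty)
    = pvFinish (((PySem.List.pyRange 0 (PySem.List.len us) 1).foldl
        (fun acc i => pvStepB acc (PySem.List.pyGetD us i "", PySem.List.pyGetD fs i 0, PySem.List.pyGetD rs i 0))
        PySem.Dict.empty).items.foldl (fun d p => d.insert p.1 (pvReduce p.2)) PySem.Dict.empty)
  rw [pvIndexLoop us fs rs h1 h2 pvStepA PySem.Dict.empty,
      pvIndexLoop us fs rs h1 h2 pvStepB PySem.Dict.empty]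
  set G := (us.zip (fs.zip rs)).foldl pvStepB PySem.Dict.empty with hG
  have hGnd : G.keys.Nodup := by
    rw [hG]
    have h := PySem.Dict.nodup_keys_foldl_modify_key (l := us.zip (fs.zip rs))
        (key := fun t : String × Int × Int => t.1) (d0 := [])
        (f := fun _ t old => old ++ [(t.2.1, t.2.2)]) (d := PySem.Dict.empty)
        PySem.Dict.nodup_keys_empty
    simpa [pvStepB] using h
  have hA : (us.zip (fs.zip rs)).foldl pvStepA PySem.Dict.empty = pvMapD G := by
    have h := pvLoop (us.zip (fs.zip rs)) PySem.Dict.empty PySem.Dict.nodup_keys_empty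
    simpa [hG] using h
  have hstats : G.items.foldl (fun d p => d.insert p.1 (pvReduce p.2)) PySem.Dict.empty = pvMapD G := by
    apply PySem.Dict.ext
    rw [PySem.Dict.items_foldl_insert_fresh G.items (fun p => p.1) (fun p => pvReduce p.2) PySem.Dict.empty
        (fun a _ => PySem.Dict.contains_empty _)
        (by simpa [PySem.Dict.keys] using hGnd)]
    rfl
  rw [hA, hstats]

-- ===== VERDICT (by name: the statement is the Claim_ definition above) =====
theorem get_scoreboard_spec : Claim_equal_get_scoreboard := by
  intro us fs rs _ hpre
  unfold Spec_get_scoreboard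
  exact get_scoreboard_eq us fs rs hpre.1 hpre.2
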